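-- pv_equiv track=rewrite | github.com/KSU-SDML/Jawdah | Jawdah.py | follow_camelCase
-- ===== SOURCE A (Python) =====
-- def follow_camelCase(text):
--
--     if (('_' in text) or ('-' in text)): return False # Rule-1
--     if not text[0].islower(): return False # Rule-2
--
--     # Rule-3 and Rule-4
--     is_upper = False
--     continuous_upper_letter_count = 0
--     for letter in text[1:]:
--         if letter.isupper():
--             continuous_upper_letter_count += 1
--             is_upper = True # a variable for: Rule-3
--         else:continuous_upper_letter_count=0
--         if continuous_upper_letter_count>=2: return False #Rule-4
--     if is_upper: return True # Rule-3
--     else: return False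
-- ===== SOURCE B (Python) =====
-- def follow_camelCase(text):
--     if ('_' in text) or ('-' in text):
--         return False  # Rule-1
--     if not text[0].islower():
--         return False  # Rule-2
--     # Positions of uppercase letters, computed once.
--     ups = [i for i, c in enumerate(text) if c.isupper()]
--     # Rule-3: at least one uppercase; Rule-4: uppercase positions never adjacent.
--     return len(ups) >= 1 and all(j - i >= 2 for i, j in zip(ups, ups[1:]))
-- ===== Notes on version B (the rewrite author's own statement) =====
-- stated objective: alternative
-- what changed: Instead of A's stateful scan with a running consecutive-uppercase counter and early return, B builds the list of uppercase positions once with enumerate and decides the result from that index list: nonempty (Rule-3) and consecutive positions differ by at least 2 (Rule-4).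
import Mathlib
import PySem

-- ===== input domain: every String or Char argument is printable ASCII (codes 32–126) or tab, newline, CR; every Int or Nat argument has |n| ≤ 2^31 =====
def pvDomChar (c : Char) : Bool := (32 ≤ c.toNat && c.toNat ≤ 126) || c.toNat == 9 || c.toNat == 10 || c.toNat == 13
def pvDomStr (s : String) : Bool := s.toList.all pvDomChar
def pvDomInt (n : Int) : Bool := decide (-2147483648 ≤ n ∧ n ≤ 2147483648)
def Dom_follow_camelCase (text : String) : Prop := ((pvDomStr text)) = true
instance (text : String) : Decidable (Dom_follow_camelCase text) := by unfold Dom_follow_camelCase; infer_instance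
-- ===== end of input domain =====

-- Header: B computes the list of uppercase positions once (enumerate + filter) and decides
-- the result from that index list (nonempty; consecutive positions differ by ≥ 2), instead
-- of A's stateful counter-driven scan ('alternative'). Pre_ excludes only the empty string,
-- on which A raises IndexError at text[0].

-- ===== PORT A =====
-- A's for-loop over text[1:] with state (is_upper, continuous_upper_letter_count),
-- early return False when the counter reaches 2.
def pvLoopA : List Char → Bool → Nat → Bool
  | [], isUp, _ => isUp
  | c :: cs, isUp, cnt =>
    if PySem.Chars.isupper c then
      if cnt + 1 ≥ 2 then false else pvLoopA cs true (cnt + 1)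
    else
      if (0 : Nat) ≥ 2 then false else pvLoopA cs isUp 0

def follow_camelCase (text : String) : Bool :=
  if PySem.Str.isIn "_" text || PySem.Str.isIn "-" text then false  -- Rule-1
  else
    match PySem.Str.pyGet? text 0 with   -- text[0]; none = IndexError, excluded by Pre_
    | none => false
    | some c =>
      if !(PySem.Chars.islower c) then false  -- Rule-2
      else pvLoopA (PySem.Str.slice text (some 1) none).toList false 0

-- ===== PORT B =====
def follow_camelCase_alt (text : String) : Bool :=
  if PySem.Str.isIn "_" text || PySem.Str.isIn "-" text then false  -- Rule-1
  else
    match PySem.Str.pyGet? text 0 with   -- text[0]; none = IndexError, excluded by Pre_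
    | none => false
    | some c =>
      if !(PySem.Chars.islower c) then false  -- Rule-2
      else
        -- ups = [i for i, c in enumerate(text) if c.isupper()]
        let ups : List Int :=
          ((PySem.List.enumerate text.toList).filter
            (fun p => PySem.Chars.isupper p.2)).map (fun p => p.1)
        -- len(ups) >= 1 and all(j - i >= 2 for i, j in zip(ups, ups[1:]))
        decide (ups.length ≥ 1) &&
          (ups.zip (PySem.List.slice ups (some 1) none)).all (fun p => decide (p.2 - p.1 ≥ 2))

-- ===== PRECONDITION & SPEC =====
-- Pre_ excludes exactly the empty string, on which A (and B) raise IndexError at text[0].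
def Pre_follow_camelCase (text : String) : Prop := text ≠ ""
instance (text : String) : Decidable (Pre_follow_camelCase text) := by unfold Pre_follow_camelCase; infer_instance
def pvWitness_follow_camelCase : String := "aB"

def Spec_follow_camelCase (text : String) (out : Bool) : Prop := out = follow_camelCase_alt text
instance (text : String) (out : Bool) : Decidable (Spec_follow_camelCase text out) := by unfold Spec_follow_camelCase; infer_instance

-- ===== CLAIM (what is proved, stated in full; the proofs are below) =====
def Claim_equal_follow_camelCase : Prop := ∀ (text : String), Dom_follow_camelCase text → Pre_follow_camelCase text → Spec_follow_camelCase text (follow_camelCase text)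

-- ===== LEMMAS AND PROOFS =====

-- In PySem, a lowercase ASCII letter is never uppercase.
theorem pvLowerNotUpper (c : Char) (h : PySem.Chars.islower c = true) :
    PySem.Chars.isupper c = false := by
  simp only [PySem.Chars.islower, Bool.and_eq_true, decide_eq_true_eq] at h
  have hz : ¬ c ≤ 'Z' := fun hc => absurd (le_trans h.1 hc) (by decide)
  simp [PySem.Chars.isupper, hz]

-- A's "no two adjacent uppercase characters", in recursive form.
def pvNoAdj : List Char → Bool
  | c1 :: c2 :: cs => !(PySem.Chars.isupper c1 && PySem.Chars.isupper c2) && pvNoAdj (c2 :: cs)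
  | _ => true

-- B's gap check over the position list, in recursive form.
def pvGapsOk : List Int → Bool
  | i :: j :: t => decide (j - i ≥ 2) && pvGapsOk (j :: t)
  | _ => true

-- The positions (starting at offset k) of the uppercase characters of a list.
def pvPosFrom (k : Int) : List Char → List Int
  | [] => []
  | c :: cs => if PySem.Chars.isupper c then k :: pvPosFrom (k + 1) cs else pvPosFrom (k + 1) cs

theorem pvGapsOk_eq_all (l : List Int) :
    (l.zip l.tail).all (fun p => decide (p.2 - p.1 ≥ 2)) = pvGapsOk l := by
  match l with
  | [] => rfl
  | [i] => rfl
  | i :: j :: t =>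
    simp only [List.tail_cons, List.zip_cons_cons, List.all_cons, pvGapsOk]
    rw [← pvGapsOk_eq_all (j :: t)]
    simp

theorem pvPosFrom_enum (cs : List Char) : ∀ (k : Int),
    ((PySem.List.enumerate cs k).filter (fun p => PySem.Chars.isupper p.2)).map
      (fun p => p.1) = pvPosFrom k cs := by
  induction cs with
  | nil => intro k; rfl
  | cons c cs ih =>
    intro k
    rw [PySem.List.enumerate_cons]
    by_cases hc : PySem.Chars.isupper c = true <;>
      simp [hc, pvPosFrom, ih (k + 1)]

theorem pvPosFrom_nil_iff (cs : List Char) : ∀ (k : Int),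
    (pvPosFrom k cs = []) ↔ cs.any PySem.Chars.isupper = false := by
  induction cs with
  | nil => intro k; simp [pvPosFrom]
  | cons c cs ih =>
    intro k
    by_cases hc : PySem.Chars.isupper c = true <;>
      simp [pvPosFrom, hc, ih (k + 1)]

theorem pvPosFrom_head_ge (cs : List Char) : ∀ (k h : Int) (t : List Int),
    pvPosFrom k cs = h :: t → k ≤ h := by
  induction cs with
  | nil => intro k h t hyp; simp [pvPosFrom] at hyp
  | cons c cs ih =>
    intro k h t hyp
    by_cases hc : PySem.Chars.isupper c = true
    · simp only [pvPosFrom, hc, if_true, List.cons.injEq] at hyp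
      omega
    · simp only [pvPosFrom, hc] at hyp
      have := ih (k + 1) h t hyp
      omega

theorem pvGapsOk_posFrom (cs : List Char) : ∀ (k : Int),
    pvGapsOk (pvPosFrom k cs) = pvNoAdj cs := by
  induction cs with
  | nil => intro k; rfl
  | cons c cs ih =>
    intro k
    by_cases hc : PySem.Chars.isupper c = true
    · simp only [pvPosFrom, hc, if_true]
      cases cs with
      | nil => rfl
      | cons c2 cs2 =>
        by_cases h2 : PySem.Chars.isupper c2 = true
        · simp only [pvPosFrom, h2, if_true, pvGapsOk, pvNoAdj, hc]
          simp
        · have hrw : pvPosFrom (k + 1) (c2 :: cs2) = pvPosFrom (k + 1 + 1) cs2 := by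
            simp only [pvPosFrom, h2, Bool.false_eq_true]
            simp
          rw [hrw]
          have hNoAdj : pvNoAdj (c :: c2 :: cs2) = pvNoAdj (c2 :: cs2) := by
            simp [pvNoAdj, h2]
          rw [hNoAdj, ← ih (k + 1), hrw]
          cases hL : pvPosFrom (k + 1 + 1) cs2 with
          | nil => rfl
          | cons h t =>
            have hge := pvPosFrom_head_ge cs2 (k + 1 + 1) h t hL
            simp only [pvGapsOk]
            have : (2 : Int) ≤ h - k := by omega
            simp [this]
    · simp only [Bool.not_eq_true] at hc
      simp only [pvPosFrom, hc, Bool.false_eq_true, if_false]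
      have hNoAdj : pvNoAdj (c :: cs) = pvNoAdj cs := by
        cases cs with
        | nil => rfl
        | cons c2 cs2 => simp [pvNoAdj, hc]
      rw [hNoAdj, ih (k + 1)]

-- A's loop, characterised: with counter 0 it is "some uppercase seen and no adjacent pair".
theorem pvLoopA_eq (cs : List Char) : ∀ (isUp : Bool),
    pvLoopA cs isUp 0 = ((isUp || cs.any PySem.Chars.isupper) && pvNoAdj cs)
    ∧ pvLoopA cs isUp 1 =
        (!(match cs with | c :: _ => PySem.Chars.isupper c | [] => false)
          && ((isUp || cs.any PySem.Chars.isupper) && pvNoAdj cs)) := by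
  induction cs with
  | nil => intro isUp; simp [pvLoopA, pvNoAdj]
  | cons c cs ih =>
    intro isUp
    by_cases hc : PySem.Chars.isupper c = true
    · constructor
      · simp only [pvLoopA, hc, if_true]
        norm_num
        rw [(ih true).2]
        cases cs with
        | nil => simp [pvNoAdj, hc]
        | cons c2 cs2 =>
          by_cases h2 : PySem.Chars.isupper c2 = true <;>
            simp [pvNoAdj, hc, h2, List.any_cons]
      · simp [pvLoopA, hc]
    · simp only [Bool.not_eq_true] at hc
      constructor
      · simp only [pvLoopA, hc]
        norm_num
        rw [(ih isUp).1]
        cases cs with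
        | nil => simp [pvNoAdj, hc]
        | cons c2 cs2 => simp [pvNoAdj, hc, List.any_cons]
      · simp only [pvLoopA, hc]
        norm_num
        rw [(ih isUp).1]
        cases cs with
        | nil => simp [pvNoAdj, hc]
        | cons c2 cs2 => simp [pvNoAdj, hc, List.any_cons]

-- pyGet? at 0 returns the head of the character list.
theorem pvGet0_head (text : String) (c : Char) (h : PySem.Str.pyGet? text 0 = some c) :
    text.toList.head? = some c := by
  cases hl : text.toList with
  | nil =>
    simp [PySem.Str.pyGet?, PySem.List.pyGet?, PySem.List.pyIdx?, hl] at h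
  | cons c0 t =>
    simp [PySem.Str.pyGet?, PySem.List.pyGet?, PySem.List.pyIdx?, hl] at h
    simp [h]

-- ===== VERDICT (by name: the statement is the Claim_ definition above) =====
theorem follow_camelCase_spec : Claim_equal_follow_camelCase := by
  intro text _ _
  unfold Spec_follow_camelCase follow_camelCase follow_camelCase_alt
  split
  · rfl
  · cases hget : PySem.Str.pyGet? text 0 with
    | none => rfl
    | some c =>
      cases hl : PySem.Chars.islower c with
      | false => simp only [hl, Bool.not_false, if_true]
      | true =>
        simp only [hl, Bool.not_true, Bool.false_eq_true, if_false]
        have hhead := pvGet0_head text c hget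
        obtain ⟨rest, hcs⟩ : ∃ rest, text.toList = c :: rest := by
          cases h : text.toList with
          | nil => rw [h] at hhead; simp at hhead
          | cons c0 t =>
            rw [h] at hhead
            simp at hhead
            exact ⟨t, by rw [hhead]⟩
        have hup : PySem.Chars.isupper c = false := pvLowerNotUpper c hl
        have hpos : pvPosFrom 0 (c :: rest) = pvPosFrom 1 rest := by
          simp [pvPosFrom, hup]
        simp only [PySem.Str.toList_slice, PySem.Chars.slice, PySem.List.slice_from_one, hcs, List.tail_cons,
          pvPosFrom_enum, pvGapsOk_eq_all]
        rw [hpos, (pvLoopA_eq rest false).1, pvGapsOk_posFrom]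
        cases hany : rest.any PySem.Chars.isupper with
        | false =>
          have : pvPosFrom 1 rest = [] := (pvPosFrom_nil_iff rest 1).mpr hany
          simp [this]
        | true =>
          have hne : pvPosFrom 1 rest ≠ [] := by
            intro he
            rw [(pvPosFrom_nil_iff rest 1).mp he] at hany
            exact Bool.false_ne_true hany
          have hlen : decide (1 ≤ (pvPosFrom 1 rest).length) = true := by
            simp [Nat.one_le_iff_ne_zero, List.length_eq_zero_iff, hne]
          simp [hlen]
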